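-- pv_equiv track=rewrite | github.com/EurekaAKIRA/Ventus | platform/case-generation/src/case_generation/api_scenario_builder_v2.py | _contains_explicit_endpoint_reference
-- ===== SOURCE A (Python) =====
-- def _contains_explicit_endpoint_reference(text: str, method: str, path: str) -> bool:
--     lowered = text.lower()
--     method_lower = str(method or "").lower()
--     path_lower = str(path or "").lower().rstrip("/")
--     if not path_lower:
--         return False
--     if method_lower:
--         needle = f"{method_lower} {path_lower}"
--         search_from = 0
--         while True:
--             pos = lowered.find(needle, search_from)
--             if pos < 0:
--                 break
--             end = pos + len(needle)
--             if lowered[end : end + 1] != "/":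
--                 return True
--             search_from = pos + 1
--     search_from = 0
--     while True:
--         pos = lowered.find(path_lower, search_from)
--         if pos < 0:
--             return False
--         end = pos + len(path_lower)
--         if lowered[end : end + 1] != "/":
--             return True
--         search_from = pos + 1
-- ===== SOURCE B (Python) =====
-- def _mentions_unslashed(lowered: str, needle: str) -> bool:
--     n = len(needle)
--     return any(
--         lowered[i:i + n] == needle and lowered[i + n:i + n + 1] != "/"
--         for i in range(len(lowered) - n + 1)
--     )
--
--
-- def _contains_explicit_endpoint_reference(text: str, method: str, path: str) -> bool:
--     lowered = text.lower()
--     method_lower = str(method or "").lower()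
--     path_lower = str(path or "").lower().rstrip("/")
--     if not path_lower:
--         return False
--     if method_lower and _mentions_unslashed(lowered, f"{method_lower} {path_lower}"):
--         return True
--     return _mentions_unslashed(lowered, path_lower)
-- ===== Notes on version B (the rewrite author's own statement) =====
-- stated objective: simpler
-- what changed: The two find-and-resume while loops with early returns are replaced by one shared helper that scans every start position once with a slice comparison (any-comprehension), instead of jumping between str.find occurrences and restarting the search.
import Mathlib
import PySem

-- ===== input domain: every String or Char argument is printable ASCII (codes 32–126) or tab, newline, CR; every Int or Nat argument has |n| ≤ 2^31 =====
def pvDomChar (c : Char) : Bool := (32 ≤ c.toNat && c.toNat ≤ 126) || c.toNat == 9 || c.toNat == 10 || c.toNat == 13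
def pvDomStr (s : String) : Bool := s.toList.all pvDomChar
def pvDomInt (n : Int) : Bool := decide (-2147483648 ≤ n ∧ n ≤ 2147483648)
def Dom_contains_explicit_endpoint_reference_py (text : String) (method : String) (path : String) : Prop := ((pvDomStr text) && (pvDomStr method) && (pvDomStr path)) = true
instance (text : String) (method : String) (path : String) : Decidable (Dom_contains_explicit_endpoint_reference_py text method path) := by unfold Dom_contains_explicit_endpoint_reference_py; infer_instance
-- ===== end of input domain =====

-- B replaces A's two find-and-resume while loops by one helper that scans every start
-- position with a slice comparison (simpler decomposition; no speed claim).

-- shared preprocessing helper: s.rstrip("/") on List Char (PySem has no rstrip-with-chars;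
-- exact: Python removes exactly the maximal run of trailing '/' characters)
def pvRstripSlash (cs : List Char) : List Char :=
  (cs.reverse.dropWhile (fun c => c == '/')).reverse

-- ===== PORT A =====
-- the 'while True: pos = lowered.find(needle, search_from); …' loop of A; returning true = A's
-- 'return True', false = loop left without returning (break / 'return False'); the fuel argument
-- only makes the recursion total (fuel = lowered.length + 1 at both call sites is provably enough)
def pvLoopA (l nd : List Char) : Nat → Nat → Bool
  | _, 0 => false
  | k, fuel+1 =>
    let pos := PySem.Chars.findFrom l nd (k : Int) none
    if pos < 0 then false
    else
      let e := pos.toNat + nd.length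
      if PySem.List.slice l (some (e : Int)) (some ((e : Int) + 1)) ≠ ['/'] then true
      else pvLoopA l nd (pos.toNat + 1) fuel

def contains_explicit_endpoint_reference_py (text : String) (method : String) (path : String) : Bool :=
  let lowered := PySem.Chars.lower text.toList
  -- str(method or "") on a str argument is the string itself ("" stays "")
  let method_lower := PySem.Chars.lower method.toList
  let path_lower := pvRstripSlash (PySem.Chars.lower path.toList)
  if path_lower.isEmpty then false
  else
    let fromMethod :=
      if ¬ method_lower.isEmpty then
        pvLoopA lowered (method_lower ++ ' ' :: path_lower) 0 (lowered.length + 1)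
      else false
    if fromMethod then true
    else pvLoopA lowered path_lower 0 (lowered.length + 1)

-- ===== PORT B =====
def pvMentionsUnslashed (lowered needle : List Char) : Bool :=
  let n : Int := needle.length
  (PySem.List.pyRange 0 ((lowered.length : Int) - n + 1) 1).any fun i =>
    (PySem.List.slice lowered (some i) (some (i + n)) == needle) &&
    !(PySem.List.slice lowered (some (i + n)) (some (i + n + 1)) == ['/'])

def contains_explicit_endpoint_reference_py_alt (text : String) (method : String) (path : String) : Bool :=
  let lowered := PySem.Chars.lower text.toList
  let method_lower := PySem.Chars.lower method.toList
  let path_lower := pvRstripSlash (PySem.Chars.lower path.toList)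
  if path_lower.isEmpty then false
  else if ¬ method_lower.isEmpty ∧ pvMentionsUnslashed lowered (method_lower ++ ' ' :: path_lower) then true
  else pvMentionsUnslashed lowered path_lower

-- ===== PRECONDITION & SPEC =====
def Spec_contains_explicit_endpoint_reference_py (text : String) (method : String) (path : String) (out : Bool) : Prop := out = contains_explicit_endpoint_reference_py_alt text method path
instance (text : String) (method : String) (path : String) (out : Bool) : Decidable (Spec_contains_explicit_endpoint_reference_py text method path out) := by unfold Spec_contains_explicit_endpoint_reference_py; infer_instance

-- ===== CLAIM (what is proved, stated in full; the proofs are below) =====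
def Claim_equal_contains_explicit_endpoint_reference_py : Prop := ∀ (text : String) (method : String) (path : String), Dom_contains_explicit_endpoint_reference_py text method path → Spec_contains_explicit_endpoint_reference_py text method path (contains_explicit_endpoint_reference_py text method path)

-- ===== LEMMAS AND PROOFS =====

-- the common predicate both programs decide: an occurrence of nd at position i in l whose
-- following character (if any) is not '/'
def pvHit (l nd : List Char) (i : Nat) : Prop :=
  nd <+: l.drop i ∧ l[i + nd.length]? ≠ some '/'

lemma pv_slice_one_eq_slash (l : List Char) (e : Nat) :
    PySem.List.slice l (some (e : Int)) (some ((e : Int) + 1)) = ['/'] ↔ l[e]? = some '/' := by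
  have h1 : ((e : Int) + 1) = ((e : Int) + ((1 : Nat) : Int)) := by norm_cast
  rw [h1, PySem.List.slice_natCast_add]
  have h0 : l[e]? = (l.drop e)[0]? := by simp
  rw [h0]
  rcases hd : l.drop e with _ | ⟨c, rest⟩ <;> simp

lemma pv_slice_eq_needle (l nd : List Char) (k : Nat) :
    PySem.List.slice l (some (k : Int)) (some ((k : Int) + (nd.length : Int))) = nd ↔ nd <+: l.drop k := by
  rw [PySem.List.slice_natCast_add]
  constructor
  · intro h; rw [← h]; exact List.take_prefix _ _
  · intro h; exact (List.prefix_iff_eq_take.mp h).symm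

lemma pv_hit_len {l nd : List Char} {i : Nat} (hnd : nd ≠ []) (h : nd <+: l.drop i) :
    i + nd.length ≤ l.length := by
  have h1 := h.length_le
  have h2 : (l.drop i).length = l.length - i := by simp
  have h3 : 0 < nd.length := List.length_pos_iff.mpr hnd
  by_cases hi : i ≤ l.length
  · omega
  · exfalso
    have : l.drop i = [] := List.drop_eq_nil_of_le (by omega)
    rw [this] at h
    exact hnd (List.prefix_nil.mp h)

lemma pv_drop_sub (l : List Char) (k i : Nat) (hki : k ≤ i) :
    ((l.drop k).drop (i - k)) = l.drop i := by
  rw [List.drop_drop]; congr 1; omega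

lemma pv_pred_iff (l nd : List Char) (k : Nat) :
    ((PySem.List.slice l (some (k : Int)) (some ((k : Int) + (nd.length : Int))) == nd) &&
     !(PySem.List.slice l (some ((k : Int) + (nd.length : Int))) (some ((k : Int) + (nd.length : Int) + 1)) == ['/'])) = true
    ↔ pvHit l nd k := by
  have hc : ((k : Int) + (nd.length : Int)) = ((k + nd.length : Nat) : Int) := by push_cast; ring
  rw [Bool.and_eq_true, beq_iff_eq, Bool.not_eq_true', beq_eq_false_iff_ne, Ne,
      pv_slice_eq_needle, hc, pv_slice_one_eq_slash]
  exact Iff.rfl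

lemma pvMentionsUnslashed_iff (l nd : List Char) (hnd : nd ≠ []) :
    pvMentionsUnslashed l nd = true ↔ ∃ i, pvHit l nd i := by
  have h3 : 0 < nd.length := List.length_pos_iff.mpr hnd
  dsimp only [pvMentionsUnslashed]
  rw [PySem.List.pyRange_one, List.any_map, List.any_eq_true]
  constructor
  · rintro ⟨k, hk, hf⟩
    simp only [Function.comp, zero_add] at hf
    exact ⟨k, (pv_pred_iff l nd k).mp hf⟩
  · rintro ⟨i, hi⟩
    have hb := pv_hit_len hnd hi.1
    refine ⟨i, ?_, ?_⟩
    · rw [List.mem_range]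
      omega
    · simp only [Function.comp, zero_add]
      exact (pv_pred_iff l nd i).mpr hi

lemma pvLoopA_iff (l nd : List Char) (hnd : nd ≠ []) :
    ∀ fuel k, k ≤ l.length → l.length + 1 ≤ fuel + k →
      (pvLoopA l nd k fuel = true ↔ ∃ i, k ≤ i ∧ pvHit l nd i) := by
  have h3 : 0 < nd.length := List.length_pos_iff.mpr hnd
  intro fuel
  induction fuel with
  | zero => intro k hk hf; omega
  | succ fuel ih =>
    intro k hk hf
    rw [pvLoopA, PySem.Chars.findFrom_natCast l nd k hk]
    set f := PySem.Chars.find (l.drop k) nd with hfind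
    by_cases hneg : f = -1
    · rw [if_pos (by rw [if_pos hneg]; norm_num)]
      have hnocc : ¬ nd <:+: l.drop k := (PySem.Chars.find_eq_neg_one_iff _ _).mp hneg
      constructor
      · intro h; exact absurd h (by simp)
      · rintro ⟨i, hki, hocc, -⟩
        exfalso
        apply hnocc
        have : nd <+: (l.drop k).drop (i - k) := by rw [pv_drop_sub l k i hki]; exact hocc
        have hin : PySem.Chars.isIn nd (l.drop k) = true :=
          (PySem.Chars.exists_prefix_drop_iff_isIn _ _).mp ⟨i - k, this⟩
        exact (PySem.Chars.isIn_iff_infix _ _).mp hin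
    · have hge : 0 ≤ f := by
        have := PySem.Chars.neg_one_le_find (l.drop k) nd
        rw [← hfind] at this; omega
      rw [if_neg hneg, if_neg (by omega : ¬ ((k : Int) + f < 0))]
      have hspec := PySem.Chars.find_spec (s := l.drop k) (sub := nd) (by rw [← hfind]; exact hge)
      rw [← hfind] at hspec
      obtain ⟨hocc0, hmin⟩ := hspec
      set p := k + f.toNat with hp
      have hposNat : ((k : Int) + f).toNat = p := by omega
      have hoccp : nd <+: l.drop p := by
        rw [← pv_drop_sub l k p (by omega)]
        simpa [hp] using hocc0
      have hb : p + nd.length ≤ l.length := pv_hit_len hnd hoccp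
      rw [hposNat]
      by_cases hs : l[p + nd.length]? = some '/'
      · simp only [ne_eq, pv_slice_one_eq_slash, hs, not_true_eq_false, if_false]
        rw [ih (p+1) (by omega) (by omega)]
        constructor
        · rintro ⟨i, hpi, hi⟩; exact ⟨i, by omega, hi⟩
        · rintro ⟨i, hki, hi⟩
          refine ⟨i, ?_, hi⟩
          rcases Nat.lt_or_ge i (p+1) with hlt | hge'
          · exfalso
            rcases Nat.lt_or_ge i p with hlt' | hge''
            · have : ¬ nd <+: (l.drop k).drop (i - k) := hmin (i - k) (by omega)
              rw [pv_drop_sub l k i hki] at this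
              exact this hi.1
            · have hip : i = p := by omega
              exact hi.2 (hip ▸ hs)
          · exact hge'
      · simp only [ne_eq, pv_slice_one_eq_slash, hs, not_false_eq_true, if_true, true_iff]
        exact ⟨p, by omega, hoccp, hs⟩

lemma pvLoops_agree (l nd : List Char) (hnd : nd ≠ []) :
    pvLoopA l nd 0 (l.length + 1) = pvMentionsUnslashed l nd := by
  rw [Bool.eq_iff_iff, pvLoopA_iff l nd hnd (l.length + 1) 0 (by omega) (by omega),
      pvMentionsUnslashed_iff l nd hnd]
  constructor
  · rintro ⟨i, _, h⟩; exact ⟨i, h⟩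
  · rintro ⟨i, h⟩; exact ⟨i, Nat.zero_le i, h⟩

-- ===== VERDICT (by name: the statement is the Claim_ definition above) =====
theorem contains_explicit_endpoint_reference_py_spec : Claim_equal_contains_explicit_endpoint_reference_py := by
  intro text method path _
  unfold Spec_contains_explicit_endpoint_reference_py
  unfold contains_explicit_endpoint_reference_py contains_explicit_endpoint_reference_py_alt
  set lowered := PySem.Chars.lower text.toList with hl
  set method_lower := PySem.Chars.lower method.toList with hm
  set path_lower := pvRstripSlash (PySem.Chars.lower path.toList) with hp
  by_cases hpe : path_lower.isEmpty
  · simp [hpe]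
  · have hpne : path_lower ≠ [] := by
      intro h; rw [h] at hpe; simp at hpe
    simp only [hpe]
    by_cases hme : method_lower.isEmpty
    · simp [hme, pvLoops_agree lowered path_lower hpne]
    · have hmndne : method_lower ++ ' ' :: path_lower ≠ [] := by simp
      simp [hme, pvLoops_agree lowered (method_lower ++ ' ' :: path_lower) hmndne,
            pvLoops_agree lowered path_lower hpne]
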